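-- pv_equiv track=rewrite | github.com/dakhnod/gpioASM-compiler-python | gpioasm/compiler.py | _encode_pin_bits
-- ===== SOURCE A (Python) =====
-- import math
--
-- def _encode_pin_bits(arg):
--     payload = [0xFF] * math.ceil(len(arg) / 4)
--     for i in range(len(arg)):
--         bit_index = (i * 2) % 8
--         byte_index = len(payload) - math.floor(i / 4) - 1
--         state = arg[i]
--         if state == '0':
--             payload[byte_index] &= ~(0b11 << bit_index)
--         elif state == '1':
--             payload[byte_index] &= ~(0b10 << bit_index)
--         elif state == 'i':
--             payload[byte_index] &= ~(0b01 << bit_index)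
--     return payload
-- ===== SOURCE B (Python) =====
-- _CODES = {'0': 0b00, '1': 0b01, 'i': 0b10}
--
-- def _encode_pin_bits(arg):
--     payload = []
--     for k in range(0, len(arg), 4):
--         chunk = arg[k:k + 4]
--         byte = 0
--         for j in range(4):
--             code = _CODES.get(chunk[j], 0b11) if j < len(chunk) else 0b11
--             byte |= code << (2 * j)
--         payload.append(byte)
--     payload.reverse()
--     return payload
-- ===== Notes on version B (the rewrite author's own statement) =====
-- stated objective: alternative
-- what changed: B iterates over the string in 4-character chunks, building each output byte by OR-ing 2-bit codes from a code table into a byte and reversing the list at the end, instead of A's per-character AND-masking of a preallocated 0xFF array addressed by a reversed byte index.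
import Mathlib
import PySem

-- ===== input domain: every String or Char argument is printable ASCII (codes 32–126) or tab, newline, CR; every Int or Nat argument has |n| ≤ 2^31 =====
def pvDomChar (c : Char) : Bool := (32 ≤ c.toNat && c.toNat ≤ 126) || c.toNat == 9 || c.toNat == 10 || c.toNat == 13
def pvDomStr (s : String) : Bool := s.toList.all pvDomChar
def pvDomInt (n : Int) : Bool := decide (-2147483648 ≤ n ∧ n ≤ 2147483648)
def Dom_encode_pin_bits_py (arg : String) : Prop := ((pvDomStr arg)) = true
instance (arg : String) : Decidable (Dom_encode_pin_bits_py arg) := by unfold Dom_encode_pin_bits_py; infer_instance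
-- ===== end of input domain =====

-- B builds each output byte chunk-by-chunk by OR-ing 2-bit codes from a code table and reverses
-- at the end, instead of A's per-character AND-masking into a preallocated reversed-indexed array;
-- objective: alternative structure, same cost.

-- ===== PORT A =====
def encode_pin_bits_py (arg : String) : List Int :=
  -- payload = [0xFF] * math.ceil(len(arg) / 4); on the Nat length n, math.ceil(n/4) = (n+3)/4 exactly
  let payload : List Int := List.replicate ((arg.toList.length + 3) / 4) 0xFF
  (List.range arg.toList.length).foldl (fun payload i =>
    let bit_index : Nat := (i * 2) % 8
    -- math.floor(i/4) = i / 4 on Nat i; byte_index is always in range, so getD's default is never used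
    let byte_index : Nat := payload.length - i / 4 - 1
    match PySem.Str.pyGet? arg (i : Int) with    -- arg[i]; i < len(arg), so never none
    | none => payload
    | some state =>
      if state = '0' then
        payload.set byte_index (Int.land (payload.getD byte_index 0) (Int.not (Int.shiftLeft 3 bit_index)))
      else if state = '1' then
        payload.set byte_index (Int.land (payload.getD byte_index 0) (Int.not (Int.shiftLeft 2 bit_index)))
      else if state = 'i' then
        payload.set byte_index (Int.land (payload.getD byte_index 0) (Int.not (Int.shiftLeft 1 bit_index)))
      else payload) payload

-- ===== PORT B =====
def pvCODES : PySem.Dict Char Int := ⟨[('0', 0), ('1', 1), ('i', 2)]⟩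

def pvChunkByte (chunk : List Char) : Int :=
  (List.range 4).foldl (fun byte j =>
    -- _CODES.get(chunk[j], 0b11) if j < len(chunk) else 0b11; chunk[j] is in range under the guard
    let code : Int := if j < chunk.length then PySem.Dict.getD pvCODES (chunk.getD j ' ') 3 else 3
    Int.lor byte (Int.shiftLeft code (2 * j))) 0

def encode_pin_bits_py_alt (arg : String) : List Int :=
  ((PySem.List.pyRange 0 (arg.toList.length : Int) 4).foldl (fun payload k =>
    payload ++ [pvChunkByte (PySem.List.slice arg.toList (some k) (some (k + 4)))]) []).reverse

-- ===== PRECONDITION & SPEC =====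
def Spec_encode_pin_bits_py (arg : String) (out : List Int) : Prop := out = encode_pin_bits_py_alt arg
instance (arg : String) (out : List Int) : Decidable (Spec_encode_pin_bits_py arg out) := by unfold Spec_encode_pin_bits_py; infer_instance

-- ===== CLAIM (what is proved, stated in full; the proofs are below) =====
def Claim_equal_encode_pin_bits_py : Prop := ∀ (arg : String), Dom_encode_pin_bits_py arg → Spec_encode_pin_bits_py arg (encode_pin_bits_py arg)

-- ===== LEMMAS AND PROOFS =====

-- the 2-bit code of a pin-state character, as a Fin 4
def pvCodeOf (c : Char) : Fin 4 := if c = '0' then 0 else if c = '1' then 1 else if c = 'i' then 2 else 3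

-- A's per-character update of the single affected byte, on the code level
def pvApplyK (x : Int) (i : Nat) (k : Fin 4) : Int :=
  if k = 0 then Int.land x (Int.not (Int.shiftLeft 3 ((i * 2) % 8)))
  else if k = 1 then Int.land x (Int.not (Int.shiftLeft 2 ((i * 2) % 8)))
  else if k = 2 then Int.land x (Int.not (Int.shiftLeft 1 ((i * 2) % 8)))
  else x

-- A's loop step on the code level
def pvStepK (p : List Int) (i : Nat) (k : Fin 4) : List Int :=
  let bi := p.length - i / 4 - 1
  if k = 0 then p.set bi (Int.land (p.getD bi 0) (Int.not (Int.shiftLeft 3 ((i * 2) % 8))))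
  else if k = 1 then p.set bi (Int.land (p.getD bi 0) (Int.not (Int.shiftLeft 2 ((i * 2) % 8))))
  else if k = 2 then p.set bi (Int.land (p.getD bi 0) (Int.not (Int.shiftLeft 1 ((i * 2) % 8))))
  else p

def pvBodyK (cs : List Char) (p : List Int) (i : Nat) : List Int :=
  match cs[i]? with
  | none => p
  | some c => pvStepK p i (pvCodeOf c)

-- A's whole computation, on the character-list level
def pvEncA (cs : List Char) : List Int :=
  (List.range cs.length).foldl (pvBodyK cs) (List.replicate ((cs.length + 3) / 4) 0xFF)

-- pvChunkByte on the code level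
def pvChunkK (ks : List (Fin 4)) : Int :=
  (List.range 4).foldl (fun byte j =>
    Int.lor byte (Int.shiftLeft (((ks.getD j 3).val : Int)) (2 * j))) 0

-- the common reference: list of chunk bytes, first chunk first
def pvRef : List Char → List Int
  | [] => []
  | c :: cs' => pvChunkByte (c :: cs'.take 3) :: pvRef (cs'.drop 3)
  termination_by cs => cs.length
  decreasing_by simp

lemma pvDict_eq_code (c : Char) : PySem.Dict.getD pvCODES c 3 = ((pvCodeOf c).val : Int) := by
  unfold pvCodeOf pvCODES
  split_ifs with h1 h2 h3 <;> simp_all [PySem.Dict.getD, PySem.Dict.get?, beq_iff_eq, Ne.symm]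

lemma pvChunkByte_eq_code (cs : List Char) : pvChunkByte cs = pvChunkK (cs.map pvCodeOf) := by
  have hpt : ∀ j : Nat,
      (if j < cs.length then PySem.Dict.getD pvCODES (cs.getD j ' ') 3 else 3)
        = (((cs.map pvCodeOf).getD j 3).val : Int) := by
    intro j
    by_cases hj : j < cs.length
    · simp [hj, pvDict_eq_code, List.getD_eq_getElem?_getD]
    · simp [hj, List.getD_eq_getElem?_getD]
  simp only [pvChunkByte, pvChunkK, show List.range 4 = [0, 1, 2, 3] from rfl, List.foldl, hpt]

lemma pvPortA_eq (arg : String) : encode_pin_bits_py arg = pvEncA arg.toList := by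
  unfold encode_pin_bits_py pvEncA
  refine PySem.List.foldl_congr_mem _ _ _ _ ?_
  intro p i _
  show (match PySem.Str.pyGet? arg (i : Int) with
    | none => p
    | some state =>
      if state = '0' then
        p.set (p.length - i / 4 - 1) (Int.land (p.getD (p.length - i / 4 - 1) 0) (Int.not (Int.shiftLeft 3 ((i * 2) % 8))))
      else if state = '1' then
        p.set (p.length - i / 4 - 1) (Int.land (p.getD (p.length - i / 4 - 1) 0) (Int.not (Int.shiftLeft 2 ((i * 2) % 8))))
      else if state = 'i' then
        p.set (p.length - i / 4 - 1) (Int.land (p.getD (p.length - i / 4 - 1) 0) (Int.not (Int.shiftLeft 1 ((i * 2) % 8))))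
      else p) = pvBodyK arg.toList p i
  simp only [PySem.Str.pyGet?_natCast, pvBodyK]
  cases h : arg.toList[i]? with
  | none => rfl
  | some c =>
    unfold pvStepK pvCodeOf
    dsimp only
    split_ifs <;> simp_all

lemma pvStepK_length (p : List Int) (i : Nat) (k : Fin 4) : (pvStepK p i k).length = p.length := by
  unfold pvStepK; split_ifs <;> simp

lemma pvBodyK_length (cs : List Char) (p : List Int) (i : Nat) : (pvBodyK cs p i).length = p.length := by
  unfold pvBodyK; cases cs[i]? <;> simp [pvStepK_length]

lemma pvStepK_last (q : List Int) (x : Int) (i : Nat) (hi : i < 4) (k : Fin 4) :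
    pvStepK (q ++ [x]) i k = q ++ [pvApplyK x i k] := by
  have h4 : i / 4 = 0 := by omega
  have hbi : (q ++ [x]).length - i / 4 - 1 = q.length := by simp [h4]
  have hset : ∀ v : Int, (q ++ [x]).set q.length v = q ++ [v] := by intro v; simp
  have hget : (q ++ [x]).getD q.length 0 = x := by simp [List.getD]
  unfold pvStepK pvApplyK
  split_ifs <;> simp only [hbi, hset, hget]

lemma pvStepK_shift (q : List Int) (x : Int) (i : Nat) (hq : q ≠ []) (k : Fin 4) :
    pvStepK (q ++ [x]) (4 + i) k = pvStepK q i k ++ [x] := by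
  have hlen : 0 < q.length := List.length_pos_iff.mpr hq
  have hdiv : (4 + i) / 4 = i / 4 + 1 := by omega
  have hbi : (q ++ [x]).length - (4 + i) / 4 - 1 = q.length - i / 4 - 1 := by
    simp only [List.length_append, List.length_cons, List.length_nil, hdiv]
    omega
  have hlt : q.length - i / 4 - 1 < q.length := by omega
  have hmod : ((4 + i) * 2) % 8 = (i * 2) % 8 := by omega
  unfold pvStepK
  split_ifs <;> simp [hmod, hlt, List.getD, List.getElem?_append_left hlt]

lemma pvBodyK_shift (cs : List Char) (q : List Int) (x : Int) (i : Nat) (hq : q ≠ []) :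
    pvBodyK cs (q ++ [x]) (4 + i) = pvBodyK (cs.drop 4) q i ++ [x] := by
  unfold pvBodyK
  rw [show (cs.drop 4)[i]? = cs[4 + i]? from List.getElem?_drop]
  cases cs[4 + i]? with
  | none => rfl
  | some c => exact pvStepK_shift q x i hq _

lemma pvFoldShift (cs : List Char) (x : Int) :
    ∀ (l : List Nat) (q : List Int), q ≠ [] →
      l.foldl (fun p i => pvBodyK cs p (4 + i)) (q ++ [x])
        = l.foldl (pvBodyK (cs.drop 4)) q ++ [x] := by
  intro l
  induction l with
  | nil => intro q hq; rfl
  | cons a l ih =>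
    intro q hq
    simp only [List.foldl_cons]
    rw [pvBodyK_shift cs q x a hq, ih]
    intro hnil
    have := pvBodyK_length (cs.drop 4) q a
    rw [hnil] at this
    exact hq (List.eq_nil_of_length_eq_zero this.symm)

-- Nat.ldiff (which the kernel cannot evaluate) expressed through kernel-computable xor/and
lemma pvLdiffEq (a b : Nat) : Nat.ldiff a b = a ^^^ (a &&& b) := by
  apply Nat.eq_of_testBit_eq
  intro k
  simp only [Nat.testBit_ldiff, Nat.testBit_xor, Nat.testBit_land]
  cases a.testBit k <;> cases b.testBit k <;> rfl

lemma pvLandNot (x m : Nat) : Int.land (x : Int) (Int.not (m : Int)) = ((x ^^^ (x &&& m) : Nat) : Int) := by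
  have h1 : Int.not (m : Int) = Int.negSucc m := rfl
  rw [h1]
  show ((Nat.ldiff x m : Nat) : Int) = _
  rw [pvLdiffEq]

lemma pvLorCast (a b : Nat) : Int.lor (a : Int) (b : Int) = ((a ||| b : Nat) : Int) := rfl
lemma pvLorCastZ (b : Nat) : Int.lor (0 : Int) (b : Int) = ((0 ||| b : Nat) : Int) := rfl
lemma pvShiftCast (a : Nat) (n : Nat) : Int.shiftLeft (a : Int) n = ((a <<< n : Nat) : Int) := rfl

def pvMaskN (k : Fin 4) : Nat := if k = 0 then 3 else if k = 1 then 2 else if k = 2 then 1 else 0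

lemma pvApplyK_eval (x : Nat) (i : Nat) (k : Fin 4) :
    pvApplyK (x : Int) i k = ((x ^^^ (x &&& (pvMaskN k <<< (i * 2 % 8))) : Nat) : Int) := by
  unfold pvApplyK pvMaskN
  by_cases h0 : k = 0
  · subst h0
    rw [if_pos rfl, if_pos rfl, show (3 : Int) = ((3 : Nat) : Int) from rfl, pvShiftCast, pvLandNot]
  · by_cases h1 : k = 1
    · subst h1
      rw [if_neg (by decide), if_pos rfl, if_neg (by decide), if_pos rfl,
        show (2 : Int) = ((2 : Nat) : Int) from rfl, pvShiftCast, pvLandNot]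
    · by_cases h2 : k = 2
      · subst h2
        rw [if_neg (by decide), if_neg (by decide), if_pos rfl, if_neg (by decide),
          if_neg (by decide), if_pos rfl, show (1 : Int) = ((1 : Nat) : Int) from rfl, pvShiftCast,
          pvLandNot]
      · rw [if_neg h0, if_neg h1, if_neg h2, if_neg h0, if_neg h1, if_neg h2]
        simp [Nat.zero_shiftLeft]

-- the chunk identities on the code level (finite: checked by decide after casting to Nat)
lemma pvChunk1 : ∀ k0 : Fin 4, pvApplyK 255 0 k0 = pvChunkK [k0] := by
  intro k0
  rw [show (255 : Int) = ((255 : Nat) : Int) from rfl]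
  simp only [pvApplyK_eval, pvChunkK, show List.range 4 = [0, 1, 2, 3] from rfl, List.foldl,
    pvShiftCast, pvLorCastZ, pvLorCast, Int.natCast_inj]
  revert k0
  decide
lemma pvChunk2 : ∀ k0 k1 : Fin 4, pvApplyK (pvApplyK 255 0 k0) 1 k1 = pvChunkK [k0, k1] := by
  intro k0 k1
  rw [show (255 : Int) = ((255 : Nat) : Int) from rfl]
  simp only [pvApplyK_eval, pvChunkK, show List.range 4 = [0, 1, 2, 3] from rfl, List.foldl,
    pvShiftCast, pvLorCastZ, pvLorCast, Int.natCast_inj]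
  revert k0 k1
  decide
lemma pvChunk3 : ∀ k0 k1 k2 : Fin 4,
    pvApplyK (pvApplyK (pvApplyK 255 0 k0) 1 k1) 2 k2 = pvChunkK [k0, k1, k2] := by
  intro k0 k1 k2
  rw [show (255 : Int) = ((255 : Nat) : Int) from rfl]
  simp only [pvApplyK_eval, pvChunkK, show List.range 4 = [0, 1, 2, 3] from rfl, List.foldl,
    pvShiftCast, pvLorCastZ, pvLorCast, Int.natCast_inj]
  revert k0 k1 k2
  decide
lemma pvChunk4 : ∀ k0 k1 k2 k3 : Fin 4,
    pvApplyK (pvApplyK (pvApplyK (pvApplyK 255 0 k0) 1 k1) 2 k2) 3 k3 = pvChunkK [k0, k1, k2, k3] := by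
  intro k0 k1 k2 k3
  rw [show (255 : Int) = ((255 : Nat) : Int) from rfl]
  simp only [pvApplyK_eval, pvChunkK, show List.range 4 = [0, 1, 2, 3] from rfl, List.foldl,
    pvShiftCast, pvLorCastZ, pvLorCast, Int.natCast_inj]
  revert k0 k1 k2 k3
  decide

lemma pvEncA_eq_ref : ∀ (n : Nat) (cs : List Char), cs.length ≤ n → pvEncA cs = (pvRef cs).reverse := by
  intro n
  induction n with
  | zero =>
    intro cs hlen
    rw [List.eq_nil_of_length_eq_zero (Nat.le_zero.mp hlen)]
    simp [pvEncA, pvRef]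
  | succ n ih =>
    intro cs hlen
    rcases cs with _ | ⟨a, _ | ⟨b, _ | ⟨c, _ | ⟨d, _ | ⟨e, tl⟩⟩⟩⟩⟩
    · simp [pvEncA, pvRef]
    · have h1 : pvEncA [a] = pvStepK ([] ++ [255]) 0 (pvCodeOf a) := by
        simp only [pvEncA, List.length_cons, List.length_nil]
        rfl
      rw [h1, pvStepK_last [] 255 0 (by omega),
        show pvRef [a] = [pvChunkByte [a]] from by simp [pvRef]]
      simp [pvChunkByte_eq_code, pvChunk1]
    · have h1 : pvEncA [a, b] = pvStepK (pvStepK ([] ++ [255]) 0 (pvCodeOf a)) 1 (pvCodeOf b) := by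
        simp only [pvEncA, List.length_cons, List.length_nil]
        rfl
      rw [h1, pvStepK_last [] 255 0 (by omega), pvStepK_last [] _ 1 (by omega),
        show pvRef [a, b] = [pvChunkByte [a, b]] from by simp [pvRef]]
      simp [pvChunkByte_eq_code, pvChunk2]
    · have h1 : pvEncA [a, b, c]
          = pvStepK (pvStepK (pvStepK ([] ++ [255]) 0 (pvCodeOf a)) 1 (pvCodeOf b)) 2 (pvCodeOf c) := by
        simp only [pvEncA, List.length_cons, List.length_nil]
        rfl
      rw [h1, pvStepK_last [] 255 0 (by omega), pvStepK_last [] _ 1 (by omega),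
        pvStepK_last [] _ 2 (by omega),
        show pvRef [a, b, c] = [pvChunkByte [a, b, c]] from by simp [pvRef]]
      simp [pvChunkByte_eq_code, pvChunk3]
    · have h1 : pvEncA [a, b, c, d]
          = pvStepK (pvStepK (pvStepK (pvStepK ([] ++ [255]) 0 (pvCodeOf a)) 1 (pvCodeOf b)) 2 (pvCodeOf c)) 3 (pvCodeOf d) := by
        simp only [pvEncA, List.length_cons, List.length_nil]
        rfl
      rw [h1, pvStepK_last [] 255 0 (by omega), pvStepK_last [] _ 1 (by omega),
        pvStepK_last [] _ 2 (by omega), pvStepK_last [] _ 3 (by omega),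
        show pvRef [a, b, c, d] = [pvChunkByte [a, b, c, d]] from by simp [pvRef]]
      simp [pvChunkByte_eq_code, pvChunk4]
    · -- length ≥ 5: peel off the first chunk of four characters
      have hm : ((a :: b :: c :: d :: e :: tl).length + 3) / 4 = ((e :: tl).length + 3) / 4 + 1 := by
        simp only [List.length_cons]
        omega
      have hqne : List.replicate (((e :: tl).length + 3) / 4) (0xFF : Int) ≠ [] := by
        apply List.ne_nil_of_length_pos
        simp only [List.length_replicate, List.length_cons]
        omega
      have hrange : List.range (a :: b :: c :: d :: e :: tl).length
          = [0, 1, 2, 3] ++ (List.range (e :: tl).length).map (fun i => 4 + i) := by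
        rw [show (a :: b :: c :: d :: e :: tl).length = 4 + (e :: tl).length from by
            simp only [List.length_cons]; omega,
          List.range_add]
        rfl
      unfold pvEncA
      rw [hrange, hm, List.replicate_succ', List.foldl_append,
        show ∀ init : List Int, List.foldl (pvBodyK (a :: b :: c :: d :: e :: tl)) init [0, 1, 2, 3]
            = pvStepK (pvStepK (pvStepK (pvStepK init 0 (pvCodeOf a)) 1 (pvCodeOf b)) 2 (pvCodeOf c)) 3 (pvCodeOf d)
          from fun _ => rfl,
        pvStepK_last _ 0xFF 0 (by omega), pvStepK_last _ _ 1 (by omega),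
        pvStepK_last _ _ 2 (by omega), pvStepK_last _ _ 3 (by omega)]
      simp only [List.foldl_map]
      rw [pvFoldShift _ _ _ _ hqne,
        show (a :: b :: c :: d :: e :: tl).drop 4 = e :: tl from rfl,
        show (List.range (e :: tl).length).foldl (pvBodyK (e :: tl))
            (List.replicate (((e :: tl).length + 3) / 4) 0xFF) = pvEncA (e :: tl) from rfl,
        ih (e :: tl) (by simp only [List.length_cons] at hlen ⊢; omega),
        show pvRef (a :: b :: c :: d :: e :: tl) = pvChunkByte [a, b, c, d] :: pvRef (e :: tl) from by
          simp [pvRef]]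
      simp [pvChunkByte_eq_code, pvChunk4]

-- decomposition of B's chunk range
lemma pvRangeDecomp (n : Nat) (hn : 0 < n) :
    PySem.List.pyRange 0 (n : Int) 4 = 0 :: (PySem.List.pyRange 0 ((n - 4 : Nat) : Int) 4).map (· + 4) := by
  rw [PySem.List.pyRange_of_pos _ _ (by omega), PySem.List.pyRange_of_pos _ _ (by omega)]
  have hlt : (0 : Int) < (n : Int) := by exact_mod_cast hn
  by_cases h4 : n ≤ 4
  · have h1 : (((n : Int) - 0 + 4 - 1) / 4).toNat = 1 := by omega
    have h2 : (n - 4 : Nat) = 0 := by omega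
    rw [if_pos hlt, h1, h2]
    simp
  · have hlt' : (0 : Int) < ((n - 4 : Nat) : Int) := by omega
    have hm : (((n : Int) - 0 + 4 - 1) / 4).toNat = ((((n - 4 : Nat) : Int) - 0 + 4 - 1) / 4).toNat + 1 := by
      omega
    rw [if_pos hlt, if_pos hlt', hm, List.range_succ_eq_map]
    simp only [List.map_cons, List.map_map, Nat.cast_zero]
    refine List.cons_eq_cons.mpr ⟨by norm_num, ?_⟩
    apply List.map_congr_left
    intro k _
    show 0 + 4 * ((k + 1 : Nat) : Int) = (0 + 4 * (k : Int)) + 4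
    push_cast
    ring

lemma pvSliceShift (cs : List Char) (k : Int) (hk : 0 ≤ k) :
    PySem.List.slice cs (some (k + 4)) (some (k + 4 + 4)) = PySem.List.slice (cs.drop 4) (some k) (some (k + 4)) := by
  rw [PySem.List.slice_toNat _ (by omega) (by omega), PySem.List.slice_toNat _ (by omega) (by omega),
    List.drop_drop]
  congr 1
  · omega
  · congr 1
    omega

lemma pvFoldB_eq_ref : ∀ (n : Nat) (cs : List Char), cs.length ≤ n → ∀ (acc : List Int),
    (PySem.List.pyRange 0 (cs.length : Int) 4).foldl (fun payload k =>
      payload ++ [pvChunkByte (PySem.List.slice cs (some k) (some (k + 4)))]) acc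
      = acc ++ pvRef cs := by
  intro n
  induction n with
  | zero =>
    intro cs hlen acc
    rw [List.eq_nil_of_length_eq_zero (Nat.le_zero.mp hlen)]
    simp [pvRef, PySem.List.pyRange_of_pos _ _ (by omega : (0:Int) < 4)]
  | succ n ih =>
    intro cs hlen acc
    match cs with
    | [] => simp [pvRef, PySem.List.pyRange_of_pos _ _ (by omega : (0:Int) < 4)]
    | c0 :: cs' =>
      have hpos : 0 < (c0 :: cs').length := by simp
      rw [pvRangeDecomp _ hpos, List.foldl_cons, List.foldl_map]
      have hhead : PySem.List.slice (c0 :: cs') (some 0) (some (0 + 4)) = (c0 :: cs').take 4 := by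
        rw [show ((0 : Int) + 4) = ((4 : Nat) : Int) from by norm_num, PySem.List.slice_zero_start,
          PySem.List.slice_to_natCast]
      have hdroplen : ((c0 :: cs').length - 4 : Nat) = ((c0 :: cs').drop 4).length := by simp
      rw [hhead, hdroplen]
      rw [PySem.List.foldl_congr_mem _ _
        (fun payload k => payload ++ [pvChunkByte (PySem.List.slice ((c0 :: cs').drop 4) (some k) (some (k + 4)))]) _
        (by
          intro acc' k hk
          have hk0 : 0 ≤ k := ((PySem.List.mem_pyRange_iff_of_pos (by omega) k).mp hk).1
          rw [show k + 4 + 4 = k + 4 + 4 from rfl, pvSliceShift _ k hk0])]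
      rw [ih _ (by simp at hlen ⊢; omega)]
      have hrefcons : pvRef (c0 :: cs') = pvChunkByte ((c0 :: cs').take 4) :: pvRef ((c0 :: cs').drop 4) := by
        simp [pvRef]
      rw [hrefcons]
      simp

lemma pvPortB_eq (arg : String) : encode_pin_bits_py_alt arg = (pvRef arg.toList).reverse := by
  unfold encode_pin_bits_py_alt
  rw [pvFoldB_eq_ref arg.toList.length arg.toList le_rfl []]
  rfl

-- ===== VERDICT (by name: the statement is the Claim_ definition above) =====
theorem encode_pin_bits_py_spec : Claim_equal_encode_pin_bits_py := by
  intro arg _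
  unfold Spec_encode_pin_bits_py
  rw [pvPortA_eq, pvPortB_eq, pvEncA_eq_ref arg.toList.length arg.toList le_rfl]
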